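-- pv_equiv track=rewrite | github.com/brandoneng000/LeetCode | medium/2564.py | substringXorQueries
-- ===== SOURCE A (Python) =====
-- from typing import List
-- from collections import defaultdict
--
-- def substringXorQueries(s: str, queries: List[List[int]]) -> List[List[int]]:
--     n = len(s)
--     max_val = 2 ** 32
--     seen = defaultdict(lambda: [-1, -1])
--
--     for i in range(n - 1, -1, -1):
--         if s[i] == '0':
--             seen[0] = [i, i]
--             continue
--         val = 0
--
--         for j in range(i, n):
--             val = val * 2 + int(s[j])
--             if val > max_val:
--                 break
--
--             seen[val] = [i, j]
--
--     return [seen[first ^ second] for first, second in queries]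
-- ===== SOURCE B (Python) =====
-- from typing import List
--
-- def substringXorQueries(s: str, queries: List[List[int]]) -> List[List[int]]:
--     res = []
--     for first, second in queries:
--         t = first ^ second
--         if t < 0 or t > 2 ** 32:
--             # a negative target never occurs in a binary string; targets above
--             # A's 2**32 cap are reported unfound, mirroring the cap
--             res.append([-1, -1])
--             continue
--         if t == 0:
--             pat = '0'
--         else:
--             bits = []
--             while t:
--                 bits.append('1' if t & 1 else '0')
--                 t >>= 1
--             pat = ''.join(reversed(bits))
--         i = s.find(pat)
--         res.append([i, i + len(pat) - 1] if i >= 0 else [-1, -1])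
--     return res
-- ===== Notes on version B (the rewrite author's own statement) =====
-- stated objective: alternative
-- what changed: Replaces A's precomputed dict of all <=2^32-valued substrings (nested right-to-left index loops) with a direct per-query substring search: build the target's binary pattern and s.find it.
-- outside the precondition, e.g. on substringXorQueries('2', [[2, 0]]): A returns [[0, 0]], B returns [[-1, -1]]
import Mathlib
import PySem

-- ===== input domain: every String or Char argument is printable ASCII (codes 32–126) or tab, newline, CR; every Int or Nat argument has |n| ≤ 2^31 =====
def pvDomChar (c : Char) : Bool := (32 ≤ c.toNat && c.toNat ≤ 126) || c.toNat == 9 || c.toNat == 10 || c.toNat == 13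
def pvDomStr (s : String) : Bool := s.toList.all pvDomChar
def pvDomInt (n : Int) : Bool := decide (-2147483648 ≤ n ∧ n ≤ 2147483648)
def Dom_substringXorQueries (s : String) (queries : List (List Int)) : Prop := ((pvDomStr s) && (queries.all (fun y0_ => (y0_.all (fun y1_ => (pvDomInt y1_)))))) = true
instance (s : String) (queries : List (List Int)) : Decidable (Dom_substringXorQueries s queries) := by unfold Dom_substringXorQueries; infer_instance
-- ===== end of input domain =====

-- B replaces A's precomputed dict of all ≤ 2^32-valued substrings (nested index loops) by a
-- direct per-query search: build the query target's binary pattern and find it in s.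

-- ===== PORT A =====
-- int(s[j]) on a one-character string; exact on digit characters (Pre_ restricts s to '0'/'1')
def pvDigit (c : Char) : Int := (PySem.Int.ofChars? [c]).getD 0

-- inner loop: for j in range(i, n): val = val*2 + int(s[j]); if val > 2**32: break; seen[val] = [i, j]
def pvInnerA (i : Int) : List Char → Int → Int → PySem.Dict Int (List Int) → PySem.Dict Int (List Int)
  | [], _, _, seen => seen
  | c :: rest, j, val, seen =>
    let v := val * 2 + pvDigit c
    if 4294967296 < v then seen
    else pvInnerA i rest (j + 1) v (seen.insert v [i, j])

-- outer loop: for i in range(n-1, -1, -1), as a countdown over the index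
def pvOuterA (cs : List Char) : Nat → PySem.Dict Int (List Int) → PySem.Dict Int (List Int)
  | 0, seen => seen
  | i + 1, seen =>
    pvOuterA cs i
      (if cs[i]? = some '0' then seen.insert 0 [(i : Int), (i : Int)]
       else pvInnerA (i : Int) (cs.drop i) (i : Int) 0 seen)

def substringXorQueries (s : String) (queries : List (List Int)) : List (List Int) :=
  let cs := s.toList
  let seen := pvOuterA cs cs.length PySem.Dict.empty
  queries.map fun q =>
    match q with
    | [first, second] => seen.getD (PySem.Int.bxor first second) [-1, -1]
    | _ => [-1, -1]   -- a query of another arity raises ValueError in Python (outside Pre_)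

-- ===== PORT B =====
-- while t: bits.append('1' if t & 1 else '0'); t >>= 1  — t ≥ 1 here, so & 1 / >> 1 are % 2 / / 2
-- (the first argument is fuel bounding the number of halvings, so the loop is structural; fuel n ≥ n suffices)
def pvBitsRevGo : Nat → Nat → List Char
  | _, 0 => []
  | 0, _ + 1 => []
  | f + 1, n + 1 => (if (n + 1) % 2 = 1 then '1' else '0') :: pvBitsRevGo f ((n + 1) / 2)

def pvBitsRev (n : Nat) : List Char := pvBitsRevGo n n

-- pat = '0' if t == 0 else ''.join(reversed(bits))
def pvPat (t : Int) : List Char := if t = 0 then ['0'] else (pvBitsRev t.toNat).reverse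

-- loop body: one query's answer
def pvAnsB (s : String) (q : List Int) : List Int :=
  match q with
  | [] => [-1, -1]
  | [_] => [-1, -1]
  | first :: second :: rest =>
    match rest with
    | [] =>
      let t := PySem.Int.bxor first second
      if t < 0 ∨ 4294967296 < t then [-1, -1]
      else
        let pat := pvPat t
        let i := PySem.Str.find s (String.ofList pat)
        if 0 ≤ i then [i, i + (pat.length : Int) - 1] else [-1, -1]
    | _ :: _ => [-1, -1]

def substringXorQueries_alt (s : String) (queries : List (List Int)) : List (List Int) :=
  queries.map (pvAnsB s)

-- ===== PRECONDITION & SPEC =====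
-- Pre_ excludes inputs on which Python A raises (a non-digit character in s via int(), a query whose
-- arity is not 2 via tuple unpacking) and strings with digit characters 2-9, on which A's accumulated
-- int() values are an artefact of running the binary-substring index on a non-binary string.
def Pre_substringXorQueries (s : String) (queries : List (List Int)) : Prop :=
  (s.toList.all fun c => c == '0' || c == '1') = true ∧ ∀ q ∈ queries, q.length = 2
instance (s : String) (queries : List (List Int)) : Decidable (Pre_substringXorQueries s queries) := by
  unfold Pre_substringXorQueries; infer_instance

def pvWitness_substringXorQueries : String × List (List Int) := ("101", [[1, 3]])

def Spec_substringXorQueries (s : String) (queries : List (List Int)) (out : List (List Int)) : Prop := out = substringXorQueries_alt s queries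
instance (s : String) (queries : List (List Int)) (out : List (List Int)) : Decidable (Spec_substringXorQueries s queries out) := by unfold Spec_substringXorQueries; infer_instance

-- ===== CLAIM (what is proved, stated in full; the proofs are below) =====
def Claim_equal_substringXorQueries : Prop := ∀ (s : String) (queries : List (List Int)), Dom_substringXorQueries s queries → Pre_substringXorQueries s queries → Spec_substringXorQueries s queries (substringXorQueries s queries)

-- ===== LEMMAS AND PROOFS =====

def pvBin (l : List Char) : Prop := ∀ c ∈ l, c = '0' ∨ c = '1'

def pvAcc (val : Int) (l : List Char) : Int := l.foldl (fun v c => v * 2 + pvDigit c) val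

-- index (0-based, into l) of the first position whose accumulated value from val equals t
def pvHit? (val t : Int) : List Char → Option Nat
  | [] => none
  | c :: rest =>
    let v := val * 2 + pvDigit c
    if v = t then some 0 else (pvHit? v t rest).map (· + 1)

-- first p < i with pvPat t a prefix of cs.drop p
def pvFM? (cs : List Char) (t : Int) : Nat → Option Nat
  | 0 => none
  | i + 1 =>
    match pvFM? cs t i with
    | some p => some p
    | none => if pvPat t <+: cs.drop i then some i else none

theorem pvDigit_zero : pvDigit '0' = 0 := by decide
theorem pvDigit_one : pvDigit '1' = 1 := by decide

theorem pvDigit_nonneg {c : Char} (h : c = '0' ∨ c = '1') : 0 ≤ pvDigit c := by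
  rcases h with h | h <;> subst h <;> decide

theorem pvDigit_le_one {c : Char} (h : c = '0' ∨ c = '1') : pvDigit c ≤ 1 := by
  rcases h with h | h <;> subst h <;> decide

theorem pvBitsRevGo_irrel : ∀ (n f f' : Nat), n ≤ f → n ≤ f' → pvBitsRevGo f n = pvBitsRevGo f' n := by
  intro n
  induction n using Nat.strong_induction_on with
  | _ n ih =>
    intro f f' hf hf'
    rcases n with _ | k
    · cases f <;> cases f' <;> rfl
    · rcases f with _ | g
      · omega
      rcases f' with _ | g'
      · omega
      show (if (k + 1) % 2 = 1 then '1' else '0') :: pvBitsRevGo g ((k + 1) / 2)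
         = (if (k + 1) % 2 = 1 then '1' else '0') :: pvBitsRevGo g' ((k + 1) / 2)
      rw [ih ((k + 1) / 2) (by omega) g g' (by omega) (by omega)]

theorem pvBitsRev_succ (n : Nat) :
    pvBitsRev (n + 1) = (if (n + 1) % 2 = 1 then '1' else '0') :: pvBitsRev ((n + 1) / 2) := by
  show pvBitsRevGo (n + 1) (n + 1) = _
  show (if (n + 1) % 2 = 1 then '1' else '0') :: pvBitsRevGo n ((n + 1) / 2) = _
  rw [pvBitsRevGo_irrel ((n + 1) / 2) n ((n + 1) / 2) (by omega) (by omega)]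
  rfl

theorem pvAcc_nil (v : Int) : pvAcc v [] = v := rfl
theorem pvAcc_cons (v : Int) (c : Char) (l : List Char) :
    pvAcc v (c :: l) = pvAcc (v * 2 + pvDigit c) l := rfl
theorem pvAcc_append (v : Int) (l1 l2 : List Char) :
    pvAcc v (l1 ++ l2) = pvAcc (pvAcc v l1) l2 := by
  simp [pvAcc, List.foldl_append]

theorem pvAcc_le (l : List Char) : ∀ v : Int, pvBin l → 0 ≤ v → v ≤ pvAcc v l := by
  intro v hbin hv
  induction l generalizing v with
  | nil => simp [pvAcc]
  | cons c rest ih =>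
    have hc := hbin c (by simp)
    have hrest : pvBin rest := fun x hx => hbin x (by simp [hx])
    have h1 : v ≤ v * 2 + pvDigit c := by
      have := pvDigit_nonneg hc; omega
    have h2 : 0 ≤ v * 2 + pvDigit c := by
      have := pvDigit_nonneg hc; omega
    calc v ≤ v * 2 + pvDigit c := h1
      _ ≤ pvAcc (v * 2 + pvDigit c) rest := ih _ hrest h2
      _ = pvAcc v (c :: rest) := rfl

theorem pvAcc_lt (l : List Char) (hl : l ≠ []) (v : Int) (hbin : pvBin l) (hv : 1 ≤ v) :
    v < pvAcc v l := by
  match l, hl with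
  | c :: rest, _ =>
    have hc := hbin c (by simp)
    have hrest : pvBin rest := fun x hx => hbin x (by simp [hx])
    have h1 : v < v * 2 + pvDigit c := by
      have := pvDigit_nonneg hc; omega
    have h2 : 0 ≤ v * 2 + pvDigit c := by
      have := pvDigit_nonneg hc; omega
    calc v < v * 2 + pvDigit c := h1
      _ ≤ pvAcc (v * 2 + pvDigit c) rest := pvAcc_le rest _ hrest h2
      _ = pvAcc v (c :: rest) := rfl

theorem pvHit_none (l : List Char) : ∀ val t : Int, pvBin l → 0 ≤ val → t < 2 * val →
    pvHit? val t l = none := by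
  induction l with
  | nil => intro val t _ _ _; rfl
  | cons c rest ih =>
    intro val t hbin hval ht
    have hc := hbin c (by simp)
    have hrest : pvBin rest := fun x hx => hbin x (by simp [hx])
    have hd := pvDigit_nonneg hc
    have hne : ¬ (val * 2 + pvDigit c = t) := by omega
    simp only [pvHit?, hne, if_false]
    rw [ih (val * 2 + pvDigit c) t hrest (by omega) (by omega)]
    rfl

theorem pvHit_some_iff (l : List Char) : ∀ (val t : Int) (m : Nat), pvBin l → 1 ≤ val →
    (pvHit? val t l = some m ↔ m < l.length ∧ pvAcc val (l.take (m + 1)) = t) := by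
  induction l with
  | nil => intro val t m _ _; simp [pvHit?]
  | cons c rest ih =>
    intro val t m hbin hval
    have hc := hbin c (by simp)
    have hrest : pvBin rest := fun x hx => hbin x (by simp [hx])
    have hd := pvDigit_nonneg hc
    have hv1 : 1 ≤ val * 2 + pvDigit c := by omega
    by_cases he : val * 2 + pvDigit c = t
    · simp only [pvHit?, he, if_true]
      constructor
      · rintro h
        injection h with h; subst h
        exact ⟨by simp, by simpa [List.take_succ_cons, pvAcc_cons, pvAcc_nil] using he⟩
      · rintro ⟨hm, hacc⟩
        rcases m with _ | m
        · rfl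
        · exfalso
          rw [List.take_succ_cons, pvAcc_cons] at hacc
          have hml : m + 1 < rest.length + 1 := by simpa using hm
          have htk : rest.take (m + 1) ≠ [] := by
            apply List.ne_nil_of_length_pos
            rw [List.length_take]
            omega
          have hbt : pvBin (rest.take (m + 1)) :=
            fun x hx => hrest x (List.mem_of_mem_take hx)
          have := pvAcc_lt (rest.take (m + 1)) htk _ hbt hv1
          rw [hacc] at this
          omega
    · simp only [pvHit?, he, if_false]
      constructor
      · intro h
        rcases Option.map_eq_some_iff.mp h with ⟨m', hm', rfl⟩
        rcases (ih _ t m' hrest hv1).mp hm' with ⟨h1, h2⟩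
        exact ⟨by simpa using Nat.succ_lt_succ h1, by simpa [List.take_succ_cons, pvAcc_cons] using h2⟩
      · rintro ⟨hm, hacc⟩
        rcases m with _ | m
        · exact absurd (by simpa [List.take_succ_cons, pvAcc_cons, pvAcc_nil] using hacc) he
        · rw [List.take_succ_cons, pvAcc_cons] at hacc
          have : pvHit? (val * 2 + pvDigit c) t rest = some m :=
            (ih _ t m hrest hv1).mpr ⟨by simpa using hm, by simpa using hacc⟩
          simp [this]

theorem pvBitsRev_acc (n : Nat) : pvAcc 0 ((pvBitsRev n).reverse) = (n : Int) := by
  induction n using Nat.strong_induction_on with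
  | _ n ih =>
    rcases n with _ | k
    · rfl
    · rw [pvBitsRev_succ, List.reverse_cons, pvAcc_append, ih ((k + 1) / 2) (by omega)]
      rcases Nat.even_or_odd (k + 1) with he | ho
      · have h2 : (k + 1) % 2 = 0 := Nat.even_iff.mp he
        rw [if_neg (by omega), pvAcc_cons, pvAcc_nil, pvDigit_zero]
        omega
      · have h2 : (k + 1) % 2 = 1 := Nat.odd_iff.mp ho
        rw [if_pos h2, pvAcc_cons, pvAcc_nil, pvDigit_one]
        omega

theorem pvPat_acc {t : Int} (h : 0 ≤ t) : pvAcc 0 (pvPat t) = t := by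
  by_cases h0 : t = 0
  · subst h0; simp [pvPat, pvAcc, pvDigit_zero]
  · rw [pvPat, if_neg h0, pvBitsRev_acc, Int.toNat_of_nonneg h]

theorem pvBitsRev_last : ∀ n : Nat, 1 ≤ n → ∃ l, (pvBitsRev n).reverse = '1' :: l := by
  intro n
  induction n using Nat.strong_induction_on with
  | _ n ih =>
    intro h
    rcases n with _ | k
    · omega
    by_cases hk : (k + 1) / 2 = 0
    · have : k = 0 := by omega
      subst this
      exact ⟨[], by decide⟩
    · rcases ih ((k + 1) / 2) (by omega) (by omega) with ⟨l, hl⟩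
      refine ⟨l ++ [if (k + 1) % 2 = 1 then '1' else '0'], ?_⟩
      rw [pvBitsRev_succ, List.reverse_cons, hl]
      rfl

theorem pvPat_head {t : Int} (h : 1 ≤ t) : ∃ l, pvPat t = '1' :: l := by
  rw [pvPat, if_neg (by omega)]
  exact pvBitsRev_last t.toNat (by omega)

theorem pvPat_ne_nil {t : Int} (h : 0 ≤ t) : pvPat t ≠ [] := by
  rw [pvPat]
  split
  · simp
  · rename_i h0
    have h1 : 1 ≤ t.toNat := by omega
    rcases Nat.exists_eq_add_of_le h1 with ⟨k, hk⟩
    rw [show t.toNat = k + 1 by omega, pvBitsRev_succ]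
    simp

-- uniqueness of the leading-'1' binary representation
theorem pvRep (l : List Char) (hbin : pvBin l) : pvPat (pvAcc 1 l) = '1' :: l := by
  induction l using List.reverseRecOn with
  | nil => decide
  | append_singleton l c ih =>
    have hbl : pvBin l := fun x hx => hbin x (by simp [hx])
    have hc : c = '0' ∨ c = '1' := hbin c (by simp)
    have ha : (1 : Int) ≤ pvAcc 1 l := pvAcc_le l 1 hbl (by omega)
    have hd0 := pvDigit_nonneg hc
    have hd1 := pvDigit_le_one hc
    have hacc : pvAcc 1 (l ++ [c]) = pvAcc 1 l * 2 + pvDigit c := by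
      rw [pvAcc_append]; rfl
    rw [hacc, pvPat, if_neg (by omega)]
    obtain ⟨A, hA⟩ : ∃ A : Nat, pvAcc 1 l = (A : Int) :=
      ⟨(pvAcc 1 l).toNat, (Int.toNat_of_nonneg (by omega)).symm⟩
    have hA1 : 1 ≤ A := by omega
    have htn : (pvAcc 1 l * 2 + pvDigit c).toNat = A * 2 + (pvDigit c).toNat := by omega
    rw [htn]
    obtain ⟨k, hk⟩ : ∃ k, A * 2 + (pvDigit c).toNat = k + 1 := ⟨A * 2 + (pvDigit c).toNat - 1, by omega⟩
    rw [hk, pvBitsRev_succ]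
    have hdiv : (k + 1) / 2 = A := by omega
    have hrevA : (pvBitsRev A).reverse = '1' :: l := by
      have := ih hbl
      rw [pvPat, if_neg (by omega), hA] at this
      simpa using this
    have hchar : (if (k + 1) % 2 = 1 then '1' else '0') = c := by
      rcases hc with h | h <;> subst h
      · exact if_neg (by have h0 : (pvDigit '0').toNat = 0 := by decide
                         omega)
      · exact if_pos (by have h1 : (pvDigit '1').toNat = 1 := by decide
                         omega)
    rw [hdiv, List.reverse_cons, hrevA, hchar]
    rfl

theorem pvEmpty_getD (t : Int) (d : List Int) :
    (PySem.Dict.empty : PySem.Dict Int (List Int)).getD t d = d := by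
  simp [PySem.Dict.empty, PySem.Dict.getD, PySem.Dict.get?]

theorem pvInner_getD (l : List Char) : ∀ (i j val : Int), pvBin l → 1 ≤ val →
    ∀ (seen : PySem.Dict Int (List Int)) (t : Int) (d : List Int),
    (pvInnerA i l j val seen).getD t d =
      if t ≤ 4294967296 then
        match pvHit? val t l with
        | some m => [i, j + (m : Int)]
        | none => seen.getD t d
      else seen.getD t d := by
  induction l with
  | nil =>
    intro i j val hbin hval seen t d
    simp [pvInnerA, pvHit?]
  | cons c rest ih =>
    intro i j val hbin hval seen t d
    have hc : c = '0' ∨ c = '1' := hbin c (by simp)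
    have hrest : pvBin rest := fun x hx => hbin x (by simp [hx])
    have hd0 := pvDigit_nonneg hc
    have hv2 : 2 ≤ val * 2 + pvDigit c := by omega
    have heq : pvHit? val t (c :: rest)
        = (if val * 2 + pvDigit c = t then some 0
           else (pvHit? (val * 2 + pvDigit c) t rest).map (· + 1)) := rfl
    simp only [pvInnerA]
    by_cases hcap : 4294967296 < val * 2 + pvDigit c
    · rw [if_pos hcap]
      by_cases ht : t ≤ 4294967296
      · have hn : pvHit? (val * 2 + pvDigit c) t rest = none :=
          pvHit_none rest _ _ hrest (by omega) (by omega)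
        rw [if_pos ht, heq, if_neg (by omega), hn]
        rfl
      · rw [if_neg ht]
    · rw [if_neg hcap, ih i (j + 1) _ hrest (by omega) _ t d]
      by_cases hvt : val * 2 + pvDigit c = t
      · have ht : t ≤ 4294967296 := by omega
        have hn : pvHit? (val * 2 + pvDigit c) t rest = none :=
          pvHit_none rest _ _ hrest (by omega) (by omega)
        rw [if_pos ht, if_pos ht, heq, if_pos hvt, hn]
        show (seen.insert (val * 2 + pvDigit c) [i, j]).getD t d = _
        rw [PySem.Dict.getD_insert, if_pos hvt.symm]
        simp
      · rw [heq, if_neg hvt]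
        by_cases ht : t ≤ 4294967296
        · rw [if_pos ht, if_pos ht]
          cases hres : pvHit? (val * 2 + pvDigit c) t rest with
          | none =>
            show (seen.insert (val * 2 + pvDigit c) [i, j]).getD t d = _
            rw [PySem.Dict.getD_insert, if_neg (fun h => hvt h.symm)]
            rfl
          | some m =>
            show [i, j + 1 + (m : Int)] = [i, j + ((m + 1 : Nat) : Int)]
            push_cast
            ring_nf
        · rw [if_neg ht, if_neg ht]
          show (seen.insert (val * 2 + pvDigit c) [i, j]).getD t d = _
          rw [PySem.Dict.getD_insert, if_neg (fun h => hvt h.symm)]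

theorem pvStep_getD (cs : List Char) (hbin : pvBin cs) (i : Nat) (hi : i < cs.length)
    (seen : PySem.Dict Int (List Int)) (t : Int) (d : List Int) :
    (if cs[i]? = some '0' then seen.insert 0 [(i : Int), (i : Int)]
     else pvInnerA (i : Int) (cs.drop i) (i : Int) 0 seen).getD t d
    = if 0 ≤ t ∧ t ≤ 4294967296 ∧ pvPat t <+: cs.drop i
      then [(i : Int), (i : Int) + ((pvPat t).length : Int) - 1]
      else seen.getD t d := by
  have hgl : cs[i]? = some cs[i] := List.getElem?_eq_getElem hi
  have hdrop : cs.drop i = cs[i] :: cs.drop (i + 1) := List.drop_eq_getElem_cons hi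
  have hbrest : pvBin (cs.drop (i + 1)) := fun x hx => hbin x (List.mem_of_mem_drop hx)
  have hci : cs[i] = '0' ∨ cs[i] = '1' := hbin _ (List.getElem_mem hi)
  rcases hci with h0 | h1
  · rw [if_pos (by rw [hgl, h0]), PySem.Dict.getD_insert]
    by_cases ht0 : t = 0
    · subst ht0
      rw [if_pos rfl, if_pos ⟨le_refl 0, by norm_num,
        by rw [hdrop, h0]; exact List.cons_prefix_cons.mpr ⟨rfl, List.nil_prefix⟩⟩]
      norm_num [pvPat]
    · have hnot : ¬ (0 ≤ t ∧ t ≤ 4294967296 ∧ pvPat t <+: cs.drop i) := by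
        rintro ⟨htn, hcap, hpre⟩
        rcases pvPat_head (t := t) (by omega) with ⟨l, hl⟩
        rw [hl, hdrop, h0] at hpre
        exact absurd (List.cons_prefix_cons.mp hpre).1 (by decide)
      rw [if_neg ht0, if_neg hnot]
  · rw [if_neg (by rw [hgl, h1]; simp), hdrop, h1]
    have hstep : pvInnerA (i : Int) ('1' :: cs.drop (i + 1)) (i : Int) 0 seen
        = pvInnerA (i : Int) (cs.drop (i + 1)) ((i : Int) + 1) 1
            (seen.insert 1 [(i : Int), (i : Int)]) := by
      simp only [pvInnerA, pvDigit_one]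
      norm_num
    rw [hstep, pvInner_getD (cs.drop (i + 1)) _ _ _ hbrest le_rfl]
    by_cases ht : t ≤ 4294967296
    · rw [if_pos ht]
      cases hres : pvHit? 1 t (cs.drop (i + 1)) with
      | some m =>
        rcases (pvHit_some_iff (cs.drop (i + 1)) 1 t m hbrest le_rfl).mp hres with ⟨hm, hacc⟩
        have hbt : pvBin ((cs.drop (i + 1)).take (m + 1)) :=
          fun x hx => hbrest x (List.mem_of_mem_take hx)
        have hpt : pvPat t = '1' :: (cs.drop (i + 1)).take (m + 1) := by
          rw [← hacc]; exact pvRep _ hbt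
        have htpos : 1 ≤ t := by
          rw [← hacc]; exact pvAcc_le _ 1 hbt (by norm_num)
        rw [if_pos ⟨by omega, ht, by
          rw [hpt]
          exact List.cons_prefix_cons.mpr ⟨rfl, List.take_prefix _ _⟩⟩]
        rw [hpt]
        simp only [List.length_cons, List.length_take]
        have hmin : min (m + 1) (cs.drop (i + 1)).length = m + 1 := by omega
        rw [hmin]
        push_cast
        ring_nf
      | none =>
        rw [PySem.Dict.getD_insert]
        by_cases ht1 : t = 1
        · subst ht1
          rw [if_pos rfl, if_pos ⟨by norm_num, ht, by
            show pvPat 1 <+: '1' :: cs.drop (i + 1)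
            exact List.cons_prefix_cons.mpr ⟨rfl, List.nil_prefix⟩⟩]
          rw [show pvPat 1 = ['1'] from by decide]
          norm_num
        · have hnot : ¬ (0 ≤ t ∧ t ≤ 4294967296 ∧ pvPat t <+: '1' :: cs.drop (i + 1)) := by
            rintro ⟨htn, -, hpre⟩
            by_cases ht0 : t = 0
            · subst ht0
              exact absurd (List.cons_prefix_cons.mp hpre).1 (by decide)
            · rcases pvPat_head (t := t) (by omega) with ⟨l, hl⟩
              rw [hl] at hpre
              have hlpre : l <+: cs.drop (i + 1) := (List.cons_prefix_cons.mp hpre).2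
              have hlne : l ≠ [] := by
                intro hnil
                rw [hnil] at hl
                have := pvPat_acc htn
                rw [hl] at this
                have h1 : pvAcc 0 ['1'] = 1 := by decide
                omega
              have hlt : l = (cs.drop (i + 1)).take l.length := List.prefix_iff_eq_take.mp hlpre
              have hacc : pvAcc 1 l = t := by
                have := pvPat_acc htn
                rw [hl, pvAcc_cons, pvDigit_one] at this
                simpa using this
              have hlen : 1 ≤ l.length := by
                rcases l with _ | ⟨x, xs⟩
                · exact absurd rfl hlne
                · simp
              have hle : l.length ≤ (cs.drop (i + 1)).length := hlpre.length_le
              have : pvHit? 1 t (cs.drop (i + 1)) = some (l.length - 1) := by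
                apply (pvHit_some_iff _ 1 t _ hbrest le_rfl).mpr
                constructor
                · omega
                · rw [show l.length - 1 + 1 = l.length by omega, ← hlt]
                  exact hacc
              rw [this] at hres
              exact absurd hres (by simp)
          rw [if_neg ht1, if_neg hnot]
    · rw [if_neg ht, PySem.Dict.getD_insert, if_neg (by omega), if_neg (by
        rintro ⟨-, h, -⟩; omega)]

theorem pvOuter_getD (cs : List Char) (hbin : pvBin cs) :
    ∀ (i : Nat), i ≤ cs.length → ∀ (seen : PySem.Dict Int (List Int)) (t : Int) (d : List Int),
    (pvOuterA cs i seen).getD t d =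
      if 0 ≤ t ∧ t ≤ 4294967296 then
        match pvFM? cs t i with
        | some p => [(p : Int), (p : Int) + ((pvPat t).length : Int) - 1]
        | none => seen.getD t d
      else seen.getD t d := by
  intro i
  induction i with
  | zero =>
    intro _ seen t d
    simp only [pvOuterA, pvFM?]
    split <;> rfl
  | succ i ih =>
    intro hle seen t d
    rw [show pvOuterA cs (i + 1) seen
        = pvOuterA cs i (if cs[i]? = some '0' then seen.insert 0 [(i : Int), (i : Int)]
            else pvInnerA (i : Int) (cs.drop i) (i : Int) 0 seen) from rfl]
    rw [ih (by omega) _ t d, pvStep_getD cs hbin i (by omega) seen t d]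
    simp only [pvFM?]
    by_cases hcond : 0 ≤ t ∧ t ≤ 4294967296
    · rw [if_pos hcond, if_pos hcond]
      cases hfm : pvFM? cs t i with
      | some p => rfl
      | none =>
        by_cases hpre : pvPat t <+: cs.drop i
        · rw [if_pos ⟨hcond.1, hcond.2, hpre⟩, if_pos hpre]
        · rw [if_neg (by rintro ⟨-, -, h⟩; exact hpre h), if_neg hpre]
    · rw [if_neg hcond, if_neg hcond,
        if_neg (by rintro ⟨h1, h2, -⟩; exact hcond ⟨h1, h2⟩)]

theorem pvFM_none_iff (cs : List Char) (t : Int) :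
    ∀ i : Nat, (pvFM? cs t i = none ↔ ∀ p < i, ¬ pvPat t <+: cs.drop p) := by
  intro i
  induction i with
  | zero => simp [pvFM?]
  | succ i ih =>
    simp only [pvFM?]
    cases hfm : pvFM? cs t i with
    | some p =>
      simp only [reduceCtorEq, false_iff]
      intro h
      exact absurd (ih.mpr fun q hq => h q (by omega)) (by simp [hfm])
    | none =>
      by_cases hpre : pvPat t <+: cs.drop i
      · rw [if_pos hpre]
        simp only [reduceCtorEq, false_iff]
        intro h
        exact h i (by omega) hpre
      · rw [if_neg hpre]
        simp only [true_iff]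
        intro p hp
        by_cases hpi : p < i
        · exact ih.mp hfm p hpi
        · have : p = i := by omega
          subst this
          exact hpre

theorem pvFM_some_of (cs : List Char) (t : Int) (p : Nat)
    (hpre : pvPat t <+: cs.drop p) (hmin : ∀ q < p, ¬ pvPat t <+: cs.drop q) :
    ∀ i : Nat, p < i → pvFM? cs t i = some p := by
  intro i
  induction i with
  | zero => omega
  | succ i ih =>
    intro hpi
    simp only [pvFM?]
    by_cases hlt : p < i
    · rw [ih hlt]
    · have : p = i := by omega
      subst this
      rw [(pvFM_none_iff cs t p).mpr fun q hq => hmin q hq, if_pos hpre]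

-- per-query agreement
theorem pvQuery (cs : List Char) (hbin : pvBin cs) (first second : Int) :
    (pvOuterA cs cs.length PySem.Dict.empty).getD (PySem.Int.bxor first second) [-1, -1]
    = (let t := PySem.Int.bxor first second
       if t < 0 ∨ 4294967296 < t then [-1, -1]
       else
         let pat := pvPat t
         let i := PySem.Chars.find cs pat
         if 0 ≤ i then [i, i + (pat.length : Int) - 1] else [-1, -1]) := by
  dsimp only
  set t := PySem.Int.bxor first second with ht
  rw [pvOuter_getD cs hbin cs.length le_rfl]
  by_cases hr : 0 ≤ t ∧ t ≤ 4294967296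
  · rw [if_pos hr, if_neg (show ¬ (t < 0 ∨ 4294967296 < t) by omega)]
    by_cases hf : 0 ≤ PySem.Chars.find cs (pvPat t)
    · obtain ⟨hpre, hmin⟩ := PySem.Chars.find_spec hf
      have hne : pvPat t ≠ [] := pvPat_ne_nil hr.1
      have hlen1 : 1 ≤ (pvPat t).length := by
        rcases h : pvPat t with _ | ⟨x, xs⟩
        · exact absurd h hne
        · simp
      have hlen : (PySem.Chars.find cs (pvPat t)).toNat < cs.length := by
        have h1 := hpre.length_le
        rw [List.length_drop] at h1
        omega
      rw [pvFM_some_of cs t (PySem.Chars.find cs (pvPat t)).toNat hpre hmin cs.length hlen,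
        if_pos hf]
      simp [Int.toNat_of_nonneg hf]
    · have hf1 : PySem.Chars.find cs (pvPat t) = -1 := by
        have := PySem.Chars.neg_one_le_find cs (pvPat t)
        omega
      have hinf : ¬ pvPat t <:+: cs := (PySem.Chars.find_eq_neg_one_iff cs (pvPat t)).mp hf1
      have hnone : pvFM? cs t cs.length = none := by
        apply (pvFM_none_iff cs t cs.length).mpr
        intro p _ hp
        exact hinf (((PySem.Chars.isIn_iff_infix _ _).mp
          ((PySem.Chars.exists_prefix_drop_iff_isIn _ _).mp ⟨p, hp⟩)))
      rw [hnone, if_neg hf, pvEmpty_getD]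
  · rw [if_neg hr, if_pos (show t < 0 ∨ 4294967296 < t by omega), pvEmpty_getD]

-- ===== VERDICT (by name: the statement is the Claim_ definition above) =====
theorem substringXorQueries_spec : Claim_equal_substringXorQueries := by
  intro s queries _ hpre
  have hbin : pvBin s.toList := by
    intro c hc
    have := (List.all_eq_true.mp hpre.1) c hc
    simpa using this
  unfold Spec_substringXorQueries substringXorQueries substringXorQueries_alt
  apply List.map_congr_left
  intro q _
  match q with
  | [] => rfl
  | [a] => rfl
  | a :: b :: c :: r => rfl
  | [first, second] =>
    have h := pvQuery s.toList hbin first second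
    simpa [pvAnsB, PySem.Str.find_eq] using h
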